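-- pv_equiv track=rewrite | github.com/unicamp-dl/Lissard | src/repeat_copy_logic/russian.py | x_all_the_world
-- ===== SOURCE A (Python) =====
-- def x_all_the_world(times):
--     '''
--     Repeat all the world seven times, and after every second time add is a stage.
--     '''
--     out = ''
--     count = 0
--     range_ = int(times/2)
--     for x in range(0, times+range_):
--         if count == 2:
--             out+='это сцена '
--             count=0
--         else:
--             out+='весь мир '
--             count+=1
--     return out.strip()
-- ===== SOURCE B (Python) =====
-- def x_all_the_world(times):
--     n = times + int(times / 2)
--     if n <= 0:
--         return ''
--     unit = 'весь мир весь мир это сцена '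
--     if n % 3 == 0:
--         tail = ''
--     elif n % 3 == 1:
--         tail = 'весь мир '
--     else:
--         tail = 'весь мир весь мир '
--     return (unit * (n // 3) + tail).strip()
-- ===== Notes on version B (the rewrite author's own statement) =====
-- stated objective: faster
-- what changed: A appends one phrase per loop iteration over range(times + int(times/2)); B recognizes the output is periodic with period 3 and builds it in closed form as the 3-phrase unit repeated n//3 times plus an n%3 remainder tail, then strips.
import Mathlib
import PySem

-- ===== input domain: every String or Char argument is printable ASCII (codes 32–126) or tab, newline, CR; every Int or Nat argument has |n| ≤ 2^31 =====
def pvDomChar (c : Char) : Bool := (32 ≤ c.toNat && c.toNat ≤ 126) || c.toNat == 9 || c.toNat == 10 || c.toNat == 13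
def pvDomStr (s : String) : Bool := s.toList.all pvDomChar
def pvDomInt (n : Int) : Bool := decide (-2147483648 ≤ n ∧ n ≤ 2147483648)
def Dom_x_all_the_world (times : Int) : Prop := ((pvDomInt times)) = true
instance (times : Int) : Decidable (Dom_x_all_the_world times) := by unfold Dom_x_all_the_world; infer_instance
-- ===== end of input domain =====

-- B replaces A's loop (one phrase appended per iteration) with a closed form: the emitted
-- sequence is periodic with period 3, so B repeats the 3-phrase unit n//3 times and appends the
-- n%3 remainder tail (simpler; avoids the long loop).

-- ===== PORT A =====
-- the loop body: state is (out, count)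
def pvStepA (s : String × Int) (_x : Int) : String × Int :=
  if s.2 == 2 then (s.1 ++ "это сцена ", 0) else (s.1 ++ "весь мир ", s.2 + 1)

def x_all_the_world (times : Int) : String :=
  -- int(times/2): true division then int() truncates toward zero = Int.tdiv
  -- (exact here: division by 2 of a float holding an int ≤ 2^31 in magnitude is exact)
  let range_ : Int := Int.tdiv times 2
  let st := (PySem.List.pyRange 0 (times + range_) 1).foldl pvStepA ("", 0)
  PySem.Str.strip st.1

-- ===== PORT B =====
def x_all_the_world_alt (times : Int) : String :=
  let n : Int := times + Int.tdiv times 2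
  if n ≤ 0 then ""
  else
    let tail : String :=
      if PySem.Int.mod n 3 = 0 then ""
      else if PySem.Int.mod n 3 = 1 then "весь мир "
      else "весь мир весь мир "
    -- 'unit * (n // 3)' ported as joining n//3 copies of the unit
    PySem.Str.strip
      (PySem.Str.join "" (List.replicate (PySem.Int.floordiv n 3).toNat "весь мир весь мир это сцена ") ++ tail)

-- ===== PRECONDITION & SPEC =====
def Spec_x_all_the_world (times : Int) (out : String) : Prop := out = x_all_the_world_alt times
instance (times : Int) (out : String) : Decidable (Spec_x_all_the_world times out) := by unfold Spec_x_all_the_world; infer_instance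

-- ===== CLAIM (what is proved, stated in full; the proofs are below) =====
def Claim_equal_x_all_the_world : Prop := ∀ (times : Int), Dom_x_all_the_world times → Spec_x_all_the_world times (x_all_the_world times)

-- ===== LEMMAS AND PROOFS =====

-- the remainder tail after k steps, as characters
def pvPrefC (r : Nat) : List Char :=
  if r = 0 then [] else if r = 1 then "весь мир ".toList else "весь мир весь мир ".toList

-- the 3-phrase unit, as characters
def pvUc : List Char := "весь мир весь мир это сцена ".toList

-- A's loop, characterised: after k iterations the output is (k/3) units plus the (k%3) tail,
-- and the counter is k%3
theorem pvLoop_eq (k : Nat) :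
    (PySem.List.pyRange 0 (k : Int) 1).foldl pvStepA ("", 0) =
      (String.ofList (List.flatten (List.replicate (k / 3) pvUc) ++ pvPrefC (k % 3)),
       ((k % 3 : Nat) : Int)) := by
  induction k with
  | zero => decide
  | succ k ih =>
      have hcast : ((k + 1 : Nat) : Int) = (k : Int) + 1 := by push_cast; ring
      rw [hcast, PySem.List.pyRange_one_succ_right (by positivity), List.foldl_append, ih]
      have h3 : k % 3 = 0 ∨ k % 3 = 1 ∨ k % 3 = 2 := by omega
      rcases h3 with h | h | h
      · have hd : (k + 1) / 3 = k / 3 := by omega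
        have hm : (k + 1) % 3 = 1 := by omega
        simp only [List.foldl_cons, List.foldl_nil, pvStepA, h, hd, hm]
        norm_num
        apply String.toList_injective
        simp [pvPrefC, pvUc]
      · have hd : (k + 1) / 3 = k / 3 := by omega
        have hm : (k + 1) % 3 = 2 := by omega
        simp only [List.foldl_cons, List.foldl_nil, pvStepA, h, hd, hm]
        norm_num
        apply String.toList_injective
        simp [pvPrefC, pvUc]
      · have hd : (k + 1) / 3 = k / 3 + 1 := by omega
        have hm : (k + 1) % 3 = 0 := by omega
        simp only [List.foldl_cons, List.foldl_nil, pvStepA, h, hd, hm]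
        norm_num
        apply String.toList_injective
        simp [pvPrefC, pvUc, List.replicate_succ' (n := k / 3)]

-- joining with the empty separator is flattening
theorem pvJoinFlat : ∀ (l : List (List Char)), PySem.Chars.join [] l = l.flatten := by
  intro l
  induction l with
  | nil => simp [PySem.Chars.join_nil]
  | cons a t ih =>
      cases t with
      | nil => simp [PySem.Chars.join_singleton]
      | cons b t2 => rw [PySem.Chars.join_cons_cons, ih]; simp

theorem pvMod_eq (n : Int) (h : 0 < n) : PySem.Int.mod n 3 = ((n.toNat % 3 : Nat) : Int) := by
  simp [PySem.Int.mod]; rw [Int.fmod_eq_emod]; omega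

theorem pvDiv_eq (n : Int) (h : 0 < n) : (PySem.Int.floordiv n 3).toNat = n.toNat / 3 := by
  simp [PySem.Int.floordiv]; rw [Int.fdiv_eq_ediv]; omega

-- ===== VERDICT (by name: the statement is the Claim_ definition above) =====
theorem x_all_the_world_spec : Claim_equal_x_all_the_world := by
  intro times _
  unfold Spec_x_all_the_world x_all_the_world x_all_the_world_alt
  dsimp only
  by_cases h : times + Int.tdiv times 2 ≤ 0
  · rw [if_pos h, PySem.List.pyRange_one_eq_nil h]
    decide
  · rw [if_neg h]
    have hpos : 0 < times + Int.tdiv times 2 := by omega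
    have hkn : times + Int.tdiv times 2 = (((times + Int.tdiv times 2).toNat : Nat) : Int) := by omega
    rw [hkn, pvLoop_eq]
    rw [← hkn, pvMod_eq _ hpos, pvDiv_eq _ hpos]
    set k : Nat := (times + Int.tdiv times 2).toNat with hk
    congr 1
    apply String.toList_injective
    have h3 : k % 3 = 0 ∨ k % 3 = 1 ∨ k % 3 = 2 := by omega
    rcases h3 with h | h | h <;>
      simp [h, pvPrefC, pvUc, pvJoinFlat, List.map_replicate]
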